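-- pv_equiv track=rewrite | github.com/lucasgarciabertaina/Python-Exercises | guides/guide05/g05e03.py | counterLetters
-- ===== SOURCE A (Python) =====
-- def counterLetters(text):
--     exeptions = [';', ',', ' ', ':', '.']
--     counter = 0
--     condition = True
--     for i in text:
--         for j in exeptions:
--             if i == j:
--                 condition = False
--         if condition:
--             counter += 1
--         else:
--             condition = True
--     return counter
-- ===== SOURCE B (Python) =====
-- def counterLetters(text):
--     exceptions = [';', ',', ' ', ':', '.']
--     return len(text) - sum(text.count(ch) for ch in exceptions)
-- ===== Notes on version B (the rewrite author's own statement) =====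
-- stated objective: simpler
-- what changed: B counts by complement: it subtracts the tallies of the five excluded characters (one text.count per exception) from len(text), instead of A's per-character loop with a membership flag over the exception list.
import Mathlib
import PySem

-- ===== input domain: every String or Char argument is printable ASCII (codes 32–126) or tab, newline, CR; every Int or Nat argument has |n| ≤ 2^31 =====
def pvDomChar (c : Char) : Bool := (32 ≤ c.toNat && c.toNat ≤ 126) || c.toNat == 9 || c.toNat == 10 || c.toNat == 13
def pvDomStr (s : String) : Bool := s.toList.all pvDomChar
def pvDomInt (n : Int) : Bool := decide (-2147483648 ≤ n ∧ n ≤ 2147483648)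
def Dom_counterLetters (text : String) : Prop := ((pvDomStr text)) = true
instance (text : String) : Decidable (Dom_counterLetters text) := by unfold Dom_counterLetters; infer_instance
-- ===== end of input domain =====

-- B counts by complement (len(text) minus the tallies of the five excluded characters)
-- instead of A's per-character loop with a membership flag; objective: simpler.

-- ===== PORT A =====
-- the exception list, as in A (A's spelling 'exeptions' kept)
def exeptions : List Char := [';', ',', ' ', ':', '.']

def counterLetters (text : String) : Int :=
  (text.toList.foldl (fun (s : Int × Bool) i =>
      let condition := exeptions.foldl (fun c j => if i == j then false else c) s.2
      if condition then (s.1 + 1, condition) else (s.1, true))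
    (0, true)).1

-- ===== PORT B =====
def exceptionsB : List String := [";", ",", " ", ":", "."]

def counterLetters_alt (text : String) : Int :=
  (PySem.Str.len text : Int) -
    ((exceptionsB.map (fun ch => (PySem.Str.count text ch : Int))).sum)

-- ===== PRECONDITION & SPEC =====
def Spec_counterLetters (text : String) (out : Int) : Prop := out = counterLetters_alt text
instance (text : String) (out : Int) : Decidable (Spec_counterLetters text out) := by unfold Spec_counterLetters; infer_instance

-- ===== CLAIM (what is proved, stated in full; the proofs are below) =====
def Claim_equal_counterLetters : Prop := ∀ (text : String), Dom_counterLetters text → Spec_counterLetters text (counterLetters text)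

-- ===== LEMMAS AND PROOFS =====

-- Python's substring count on a single-character needle is the character count.
theorem count_go_singleton (c : Char) : ∀ (cs : List Char) (fuel acc : Nat), cs.length ≤ fuel →
    PySem.Chars.count.go [c] fuel cs acc = acc + cs.count c := by
  intro cs
  induction cs with
  | nil => intro fuel acc _; cases fuel <;> simp [PySem.Chars.count.go]
  | cons h t ih =>
    intro fuel acc hf
    cases fuel with
    | zero => simp at hf
    | succ f =>
      simp only [List.length_cons, Nat.succ_le_succ_iff] at hf
      by_cases hc : c = h
      · subst hc
        have hp : ([c].isPrefixOf (c :: t)) = true := by simp [List.isPrefixOf]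
        simp only [PySem.Chars.count.go, hp, if_true, List.length_cons, List.length_nil,
          List.drop_succ_cons, List.drop_zero]
        rw [ih f (acc + 1) hf]
        simp
        omega
      · have hp : ([c].isPrefixOf (h :: t)) = false := by
          simp [List.isPrefixOf]
          exact hc
        simp only [PySem.Chars.count.go, hp, Bool.false_eq_true, if_false]
        rw [ih f acc hf]
        simp [Ne.symm hc]

theorem chars_count_singleton (cs : List Char) (c : Char) :
    PySem.Chars.count cs [c] = cs.count c := by
  simp only [PySem.Chars.count, List.isEmpty_cons, Bool.false_eq_true, if_false]
  simpa using count_go_singleton c cs cs.length 0 (le_refl _)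

-- A's inner flag loop over the literal exception list, started from True,
-- computes non-membership of the character in the exception list.
theorem inner_flag (i : Char) :
    exeptions.foldl (fun c j => if i == j then false else c) true
      = !(exeptions.contains i) := by
  simp only [exeptions, List.foldl, List.contains]
  split_ifs <;> simp_all

-- the invariant of A's outer loop
theorem outer_loop (cs : List Char) : ∀ (n : Int),
    (cs.foldl (fun (s : Int × Bool) i =>
        let condition := exeptions.foldl (fun c j => if i == j then false else c) s.2
        if condition then (s.1 + 1, condition) else (s.1, true)) (n, true)).1
      + ((cs.count ';' : Int) + cs.count ',' + cs.count ' ' + cs.count ':' + cs.count '.')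
      = n + cs.length := by
  induction cs with
  | nil => intro n; simp
  | cons i t ih =>
    intro n
    simp only [List.foldl_cons, inner_flag i]
    by_cases hm : i ∈ exeptions
    · have hb : (!(exeptions.contains i)) = false := by simp [hm]
      rw [hb]
      simp only [Bool.false_eq_true, if_false]
      have ht := ih n
      simp [exeptions] at hm
      rcases hm with h | h | h | h | h <;> subst h <;>
        · simp at ht ⊢
          omega
    · have hb : (!(exeptions.contains i)) = true := by simp [hm]
      rw [hb]
      simp only [if_true]
      have ht := ih (n + 1)
      simp [exeptions] at hm
      obtain ⟨h1, h2, h3, h4, h5⟩ := hm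
      simp [h1, h2, h3, h4, h5] at ht ⊢
      omega

-- ===== VERDICT (by name: the statement is the Claim_ definition above) =====
theorem counterLetters_spec : Claim_equal_counterLetters := by
  intro text _
  unfold Spec_counterLetters counterLetters counterLetters_alt exceptionsB
  have h := outer_loop text.toList 0
  have e1 : ((";" : String).toList) = [';'] := rfl
  have e2 : (("," : String).toList) = [','] := rfl
  have e3 : ((" " : String).toList) = [' '] := rfl
  have e4 : ((":" : String).toList) = [':'] := rfl
  have e5 : (("." : String).toList) = ['.'] := rfl
  simp only [List.map, List.sum_cons, List.sum_nil, PySem.Str.count_eq, PySem.Str.len_eq,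
    e1, e2, e3, e4, e5, chars_count_singleton]
  simp at h ⊢
  omega
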